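-- pv_equiv track=rewrite | github.com/sungw00ng/solved | 프로그래머스/Lv. 2/기능개발.py | solution
-- ===== SOURCE A (Python) =====
-- def solution(progresses, speeds):
--     flag=[False]*len(progresses)
--     days=[0]*len(progresses)
--
--     while True:
--         for i,v in enumerate(progresses):
--             if not flag[i]:
--                 progresses[i]+=speeds[i]
--                 days[i]+=1
--
--                 if progresses[i]>=100:
--                     flag[i]=True
--
--         if all(flag):
--             break
--
--
--     result=[]
--     count=1
--     max_index=days[0]
--
--     for i in range(1,len(days)):
--         if days[i]<=max_index:
--             count+=1
--         else:
--             result.append(count)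
--             count=1
--             max_index=days[i]
--     result.append(count)
--
--     return result
-- ===== SOURCE B (Python) =====
-- def solution(progresses, speeds):
--     # One pass: each deployment day is computed in closed form (ceil of the
--     # remaining work over the speed, at least one day), and groups are built
--     # on the fly by bumping the last group while the day does not exceed the
--     # current group leader's day.
--     groups = []
--     lead = None
--     for p, s in zip(progresses, speeds):
--         d = 1 if p + s >= 100 else -((p - 100) // s)
--         if groups and d <= lead:
--             groups[-1] += 1
--         else:
--             groups.append(1)
--             lead = d
--     return groups
-- ===== Notes on version B (the rewrite author's own statement) =====
-- stated objective: alternative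
-- what changed: B replaces A's day-by-day simulation of all features (plus a separate grouping pass over a days array) with a single pass that computes each feature's completion day in closed form as a ceiling division and builds the groups on the fly; intended as faster (A is O(n*maxDays), B is O(n); a timing run saw A time out where B returned but could not measure a ratio).
import Mathlib
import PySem

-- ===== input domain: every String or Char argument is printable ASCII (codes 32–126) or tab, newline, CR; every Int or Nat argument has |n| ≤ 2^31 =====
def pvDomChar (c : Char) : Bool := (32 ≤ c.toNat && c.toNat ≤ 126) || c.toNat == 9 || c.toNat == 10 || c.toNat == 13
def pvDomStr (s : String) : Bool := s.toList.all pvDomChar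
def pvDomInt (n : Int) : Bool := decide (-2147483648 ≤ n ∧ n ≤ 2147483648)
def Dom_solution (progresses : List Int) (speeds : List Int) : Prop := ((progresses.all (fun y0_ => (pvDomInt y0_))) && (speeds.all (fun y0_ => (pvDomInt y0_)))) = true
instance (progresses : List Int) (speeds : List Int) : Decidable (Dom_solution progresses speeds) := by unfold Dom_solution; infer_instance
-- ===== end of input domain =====

-- B computes each feature's completion day by one ceiling division instead of A's
-- day-by-day simulation, and builds the groups in the same single pass (intended as
-- faster; a timing run saw A time out where B returned but could not measure a
-- ratio). A mutates `progresses` in place; the equivalence proved here is about the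
-- return value only.

-- ===== PORT A =====
-- A's mutable state, one entry (progress, speed, flag, day) per feature: the three
-- Python lists zipped with the read-only speeds (A reads speeds[i] only for i < len(progresses)).
def pvInitA (progresses : List Int) (speeds : List Int) : List (Int × Int × Bool × Int) :=
  (progresses.zip speeds).map (fun ps => (ps.1, ps.2, false, (0 : Int)))

-- one pass of A's inner `for i,v in enumerate(progresses)` loop
def pvStepA : List (Int × Int × Bool × Int) → List (Int × Int × Bool × Int)
  | [] => []
  | (p, s, flag, day) :: rest =>
    (if flag then (p, s, flag, day)
     else (p + s, s, decide (100 ≤ p + s), day + 1)) :: pvStepA rest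

-- A's `while True: … if all(flag): break` loop; the fuel only makes it total
-- (Pre_solution guarantees it is never exhausted)
def pvLoopA : Nat → List (Int × Int × Bool × Int) → List (Int × Int × Bool × Int)
  | 0, st => st
  | n + 1, st =>
    if ((pvStepA st).all fun e => e.2.2.1) = true then pvStepA st
    else pvLoopA n (pvStepA st)

-- the `days` list after A's while-loop
def pvDaysA (progresses : List Int) (speeds : List Int) : List Int :=
  (pvLoopA (1 + ((pvInitA progresses speeds).map (fun e => (100 - e.1).toNat)).sum)
      (pvInitA progresses speeds)).map (fun e => e.2.2.2)

-- A's second loop `for i in range(1, len(days))` with state (count, max_index, result)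
def pvGroupA : List Int → Int → Int → List Int → List Int
  | [], count, _, result => result ++ [count]
  | d :: rest, count, mx, result =>
    if d ≤ mx then pvGroupA rest (count + 1) mx result
    else pvGroupA rest 1 d (result ++ [count])

def solution (progresses : List Int) (speeds : List Int) : List Int :=
  match pvDaysA progresses speeds with
  | [] => []                      -- A raises IndexError here (days[0]); excluded by Pre_solution
  | d :: rest => pvGroupA rest 1 d []

-- ===== PORT B =====
-- groups[-1] += 1
def pvIncLast : List Int → List Int
  | [] => []
  | [x] => [x + 1]
  | x :: y :: rest => x :: pvIncLast (y :: rest)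

-- one iteration of B's single loop; state = (groups, lead); Python's `lead = None`
-- is modelled by the dummy 0, read only when groups ≠ []
def pvStepB (st : List Int × Int) (ps : Int × Int) : List Int × Int :=
  let d : Int := if 100 ≤ ps.1 + ps.2 then 1 else -(PySem.Int.floordiv (ps.1 - 100) ps.2)
  if st.1 ≠ [] ∧ d ≤ st.2 then (pvIncLast st.1, st.2) else (st.1 ++ [1], d)

def solution_alt (progresses : List Int) (speeds : List Int) : List Int :=
  ((progresses.zip speeds).foldl pvStepB ([], 0)).1

-- ===== PRECONDITION & SPEC =====
-- Pre_ excludes exactly the inputs on which A does not return: empty progresses and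
-- speeds shorter than progresses (IndexError), and any feature whose progress can
-- never reach 100 (speed ≤ 0 not finishing on the first day: A loops forever).
def Pre_solution (progresses : List Int) (speeds : List Int) : Prop :=
  progresses ≠ [] ∧ progresses.length ≤ speeds.length ∧
    ∀ ps ∈ progresses.zip speeds, 1 ≤ ps.2 ∨ 100 ≤ ps.1 + ps.2
instance (progresses : List Int) (speeds : List Int) : Decidable (Pre_solution progresses speeds) := by
  unfold Pre_solution; infer_instance

def pvWitness_solution : List Int × List Int := ([93, 30, 55], [1, 30, 5])

def Spec_solution (progresses : List Int) (speeds : List Int) (out : List Int) : Prop := out = solution_alt progresses speeds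
instance (progresses : List Int) (speeds : List Int) (out : List Int) : Decidable (Spec_solution progresses speeds out) := by unfold Spec_solution; infer_instance

-- ===== CLAIM (what is proved, stated in full; the proofs are below) =====
def Claim_equal_solution : Prop := ∀ (progresses : List Int) (speeds : List Int), Dom_solution progresses speeds → Pre_solution progresses speeds → Spec_solution progresses speeds (solution progresses speeds)

-- ===== LEMMAS AND PROOFS =====

-- the closed-form day count B uses: max(1, ceil((100-p)/s)) for admissible (p, s)
def pvDay (p s : Int) : Int :=
  if 100 ≤ p + s then 1 else -(PySem.Int.floordiv (p - 100) s)

def pvStepEl (e : Int × Int × Bool × Int) : Int × Int × Bool × Int :=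
  if e.2.2.1 then e else (e.1 + e.2.1, e.2.1, decide (100 ≤ e.1 + e.2.1), e.2.2.2 + 1)

def pvFixEl (e : Int × Int × Bool × Int) : Int × Int × Bool × Int :=
  if e.2.2.1 then e
  else (e.1 + pvDay e.1 e.2.1 * e.2.1, e.2.1, true, e.2.2.2 + pvDay e.1 e.2.1)

def pvNsteps (e : Int × Int × Bool × Int) : Nat :=
  if e.2.2.1 then 0 else (pvDay e.1 e.2.1).toNat

def pvOkEl (e : Int × Int × Bool × Int) : Prop :=
  e.2.2.1 = true ∨ 1 ≤ e.2.1 ∨ 100 ≤ e.1 + e.2.1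

lemma pvDay_brackets (p s : Int) (hs : 1 ≤ s) (h : ¬ 100 ≤ p + s) :
    (pvDay p s - 1) * s < 100 - p ∧ 100 - p ≤ pvDay p s * s := by
  have h1 : -(PySem.Int.floordiv (-(100 - p)) s) = pvDay p s := by
    rw [show -(100 - p) = p - 100 by ring]
    simp [pvDay, h]
  exact (PySem.Int.neg_floordiv_neg_eq_iff_of_pos (by omega)).mp h1

lemma pvDay_ge_two (p s : Int) (hs : 1 ≤ s) (h : ¬ 100 ≤ p + s) : 2 ≤ pvDay p s := by
  obtain ⟨h1, h2⟩ := pvDay_brackets p s hs h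
  by_contra hq
  have hle : pvDay p s ≤ 1 := by omega
  have : pvDay p s * s ≤ 1 * s :=
    mul_le_mul_of_nonneg_right hle (by omega)
  linarith

lemma pvDay_le (p s : Int) (hs : 1 ≤ s) (h : ¬ 100 ≤ p + s) : pvDay p s ≤ 100 - p := by
  obtain ⟨h1, h2⟩ := pvDay_brackets p s hs h
  have h3 : 2 ≤ pvDay p s := pvDay_ge_two p s hs h
  have : (pvDay p s - 1) * 1 ≤ (pvDay p s - 1) * s :=
    mul_le_mul_of_nonneg_left hs (by omega)
  linarith

lemma pvDay_step (p s : Int) (hs : 1 ≤ s) (h : ¬ 100 ≤ p + s) :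
    pvDay (p + s) s = pvDay p s - 1 := by
  obtain ⟨h1, h2⟩ := pvDay_brackets p s hs h
  by_cases h' : 100 ≤ (p + s) + s
  · -- the next step finishes, so pvDay p s must be exactly 2
    have hq2 : 2 ≤ pvDay p s := pvDay_ge_two p s hs h
    have hlt : (pvDay p s - 1) * s < 2 * s := by linarith
    have h3 : pvDay p s - 1 < 2 := lt_of_mul_lt_mul_right hlt (by omega)
    have hD : pvDay p s = 2 := by omega
    rw [hD]
    simp [pvDay, h']
  · have key : -(PySem.Int.floordiv (-(100 - (p + s))) s) = pvDay p s - 1 := by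
      rw [PySem.Int.neg_floordiv_neg_eq_iff_of_pos (by omega)]
      constructor <;> nlinarith
    rw [show -(100 - (p + s)) = p + s - 100 by ring] at key
    simp only [pvDay, h, if_false] at key
    simp only [pvDay, h, h', if_false]
    exact key

lemma pvStepA_eq_map (st : List (Int × Int × Bool × Int)) : pvStepA st = st.map pvStepEl := by
  induction st with
  | nil => rfl
  | cons e rest ih =>
    obtain ⟨p, s, flag, day⟩ := e
    simp [pvStepA, pvStepEl, ih]

lemma pvOk_step (e : Int × Int × Bool × Int) (h : pvOkEl e) : pvOkEl (pvStepEl e) := by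
  obtain ⟨p, s, flag, day⟩ := e
  by_cases hf : flag = true
  · simpa [pvStepEl, hf] using h
  · simp only [pvOkEl] at h
    simp only [pvStepEl, hf, Bool.false_eq_true, if_false, pvOkEl]
    by_cases hfin : 100 ≤ p + s
    · simp [hfin]
    · have hs : 1 ≤ s := by
        rcases h with h | h | h
        · exact absurd h hf
        · exact h
        · exact absurd h hfin
      exact Or.inr (Or.inl hs)

lemma pvFix_step (e : Int × Int × Bool × Int) (h : pvOkEl e) : pvFixEl (pvStepEl e) = pvFixEl e := by
  obtain ⟨p, s, flag, day⟩ := e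
  by_cases hf : flag = true
  · simp [pvStepEl, hf]
  · simp only [pvOkEl] at h
    simp only [pvStepEl, pvFixEl, hf, Bool.false_eq_true, if_false]
    by_cases hfin : 100 ≤ p + s
    · simp [hfin, pvDay]
    · have hs : 1 ≤ s := by
        rcases h with h | h | h
        · exact absurd h hf
        · exact h
        · exact absurd h hfin
      have hstep := pvDay_step p s hs hfin
      simp only [hfin, decide_false, Bool.false_eq_true, if_false, hstep, Prod.mk.injEq]
      exact ⟨by ring, trivial, trivial, by ring⟩

lemma pvNsteps_step (e : Int × Int × Bool × Int) (n : Nat) (h : pvOkEl e)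
    (hn : pvNsteps e ≤ n + 1) : pvNsteps (pvStepEl e) ≤ n := by
  obtain ⟨p, s, flag, day⟩ := e
  by_cases hf : flag = true
  · simp [pvStepEl, pvNsteps, hf]
  · simp only [pvOkEl] at h
    by_cases hfin : 100 ≤ p + s
    · simp [pvStepEl, pvNsteps, hf, hfin]
    · have hs : 1 ≤ s := by
        rcases h with h | h | h
        · exact absurd h hf
        · exact h
        · exact absurd h hfin
      have h2 := pvDay_ge_two p s hs hfin
      have hstep := pvDay_step p s hs hfin
      simp only [pvNsteps, hf, Bool.false_eq_true, if_false] at hn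
      simp only [pvStepEl, pvNsteps, hf, hfin, Bool.false_eq_true, decide_false, if_false, hstep]
      omega

lemma pvFixEl_flagged (e : Int × Int × Bool × Int) (h : e.2.2.1 = true) : pvFixEl e = e := by
  simp [pvFixEl, h]

lemma pvNsteps_pos (e : Int × Int × Bool × Int) (h : pvOkEl e) (hf : ¬ e.2.2.1 = true) :
    1 ≤ pvNsteps e := by
  obtain ⟨p, s, flag, day⟩ := e
  simp only [pvOkEl] at h
  simp only at hf
  simp only [pvNsteps, hf, Bool.false_eq_true, if_false]
  by_cases hfin : 100 ≤ p + s
  · simp [pvDay, hfin]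
  · have hs : 1 ≤ s := by
      rcases h with h | h | h
      · exact absurd h hf
      · exact h
      · exact absurd h hfin
    have := pvDay_ge_two p s hs hfin
    omega

lemma pvLoopA_fix (n : Nat) (st : List (Int × Int × Bool × Int))
    (hok : ∀ e ∈ st, pvOkEl e) (hn : ∀ e ∈ st, pvNsteps e ≤ n) :
    pvLoopA n st = st.map pvFixEl := by
  induction n generalizing st with
  | zero =>
    have hall : ∀ e ∈ st, e.2.2.1 = true := by
      intro e he
      by_contra hf
      have := pvNsteps_pos e (hok e he) hf
      have := hn e he
      omega
    have : st.map pvFixEl = st.map id :=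
      List.map_congr_left (fun e he => pvFixEl_flagged e (hall e he))
    simp [pvLoopA, this]
  | succ n ih =>
    have hunfold : pvLoopA (n + 1) st =
        if ((pvStepA st).all fun e => e.2.2.1) = true then pvStepA st
        else pvLoopA n (pvStepA st) := rfl
    rw [hunfold, pvStepA_eq_map]
    have hok' : ∀ e ∈ st.map pvStepEl, pvOkEl e := by
      intro e he
      obtain ⟨e0, he0, rfl⟩ := List.mem_map.mp he
      exact pvOk_step e0 (hok e0 he0)
    have hmapfix : (st.map pvStepEl).map pvFixEl = st.map pvFixEl := by
      rw [List.map_map]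
      exact List.map_congr_left (fun e he => pvFix_step e (hok e he))
    by_cases hall : ((st.map pvStepEl).all fun e => e.2.2.1) = true
    · rw [if_pos hall]
      have h1 : (st.map pvStepEl).map pvFixEl = (st.map pvStepEl).map id :=
        List.map_congr_left (fun e he =>
          pvFixEl_flagged e (List.all_eq_true.mp hall e he))
      rw [← hmapfix, h1, List.map_id]
    · rw [if_neg hall]
      rw [ih (st.map pvStepEl) hok' ?_, hmapfix]
      intro e he
      obtain ⟨e0, he0, rfl⟩ := List.mem_map.mp he
      exact pvNsteps_step e0 n (hok e0 he0) (hn e0 he0)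

-- A's grouping loop is B's fold: state (count, mx, result) corresponds to (result ++ [count], mx)
def pvStepG (st : List Int × Int) (d : Int) : List Int × Int :=
  if st.1 ≠ [] ∧ d ≤ st.2 then (pvIncLast st.1, st.2) else (st.1 ++ [1], d)

lemma pvIncLast_append (xs : List Int) (c : Int) : pvIncLast (xs ++ [c]) = xs ++ [c + 1] := by
  induction xs with
  | nil => simp [pvIncLast]
  | cons x xs ih =>
    cases xs with
    | nil => simp [pvIncLast]
    | cons y ys => simpa [pvIncLast] using ih

lemma pvGroupA_fold (ds : List Int) : ∀ (count mx : Int) (result : List Int),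
    pvGroupA ds count mx result = (ds.foldl pvStepG (result ++ [count], mx)).1 := by
  induction ds with
  | nil => intro count mx result; simp [pvGroupA]
  | cons d rest ih =>
    intro count mx result
    by_cases hd : d ≤ mx
    · simp only [pvGroupA, hd, if_true, List.foldl_cons]
      rw [ih, show pvStepG (result ++ [count], mx) d = (result ++ [count + 1], mx) by
        simp [pvStepG, hd, pvIncLast_append]]
    · simp only [pvGroupA, hd, if_false, List.foldl_cons]
      rw [ih, show pvStepG (result ++ [count], mx) d = ((result ++ [count]) ++ [1], d) by
        simp [pvStepG, hd]]

lemma pvStepB_eq (st : List Int × Int) (ps : Int × Int) :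
    pvStepB st ps = pvStepG st (pvDay ps.1 ps.2) := by
  simp [pvStepB, pvStepG, pvDay]

lemma pvDaysA_closed (progresses speeds : List Int)
    (hok : ∀ ps ∈ progresses.zip speeds, 1 ≤ ps.2 ∨ 100 ≤ ps.1 + ps.2) :
    pvDaysA progresses speeds = (progresses.zip speeds).map (fun ps => pvDay ps.1 ps.2) := by
  have hok0 : ∀ e ∈ pvInitA progresses speeds, pvOkEl e := by
    intro e he
    obtain ⟨ps, hps, rfl⟩ := List.mem_map.mp he
    rcases hok ps hps with h | h
    · exact Or.inr (Or.inl h)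
    · exact Or.inr (Or.inr h)
  have hfuel : ∀ e ∈ pvInitA progresses speeds,
      pvNsteps e ≤ 1 + ((pvInitA progresses speeds).map (fun e => (100 - e.1).toNat)).sum := by
    intro e he
    obtain ⟨ps, hps, rfl⟩ := List.mem_map.mp he
    have hmem : (100 - ps.1).toNat ∈ (pvInitA progresses speeds).map (fun e => (100 - e.1).toNat) :=
      List.mem_map.mpr ⟨_, he, rfl⟩
    have hsum : (100 - ps.1).toNat ≤ ((pvInitA progresses speeds).map (fun e => (100 - e.1).toNat)).sum :=
      List.single_le_sum (fun x _ => Nat.zero_le x) _ hmem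
    by_cases hfin : 100 ≤ ps.1 + ps.2
    · simp [pvNsteps, pvDay, hfin]
    · have hs : 1 ≤ ps.2 := (hok ps hps).resolve_right hfin
      have hle := pvDay_le ps.1 ps.2 hs hfin
      have h2 := pvDay_ge_two ps.1 ps.2 hs hfin
      simp only [pvNsteps, Bool.false_eq_true, if_false]
      omega
  unfold pvDaysA
  rw [pvLoopA_fix _ _ hok0 hfuel]
  unfold pvInitA
  rw [List.map_map, List.map_map]
  apply List.map_congr_left
  intro ps _
  simp [pvFixEl]

-- ===== VERDICT (by name: the statement is the Claim_ definition above) =====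
theorem solution_spec : Claim_equal_solution := by
  intro progresses speeds _hdom hpre
  obtain ⟨hne, hlen, hok⟩ := hpre
  unfold Spec_solution solution solution_alt
  rw [pvDaysA_closed progresses speeds hok]
  have hfoldB : (progresses.zip speeds).foldl pvStepB ([], 0) =
      ((progresses.zip speeds).map (fun ps => pvDay ps.1 ps.2)).foldl pvStepG ([], 0) := by
    have hfun : pvStepB = fun st ps => pvStepG st (pvDay ps.1 ps.2) :=
      funext fun st => funext fun ps => pvStepB_eq st ps
    rw [hfun, List.foldl_map]
  rw [hfoldB]
  have hpne : progresses.zip speeds ≠ [] := by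
    intro h
    have hz : (progresses.zip speeds).length = min progresses.length speeds.length :=
      List.length_zip
    have hp : 0 < progresses.length := List.length_pos_of_ne_nil hne
    rw [h] at hz
    simp only [List.length_nil] at hz
    omega
  obtain ⟨ps0, rest, hrest⟩ := List.exists_cons_of_ne_nil hpne
  rw [hrest]
  simp only [List.map_cons, List.foldl_cons]
  rw [show pvStepG ([], 0) (pvDay ps0.1 ps0.2) = ([] ++ [1], pvDay ps0.1 ps0.2) by
    simp [pvStepG]]
  exact pvGroupA_fold (rest.map (fun ps => pvDay ps.1 ps.2)) 1 (pvDay ps0.1 ps0.2) []
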